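-- pv_equiv track=rewrite | github.com/boostcampaitech7/level2-mrc-nlp-02 | Retriever/leeinseol/utils_retriever.py | get_docs_id
-- ===== SOURCE A (Python) =====
-- def get_docs_id(corpus, ground_context) :
--     context_to_id = {context: id for id, context in corpus.items()}
--
--     doc_ids = []
--     for context in ground_context :
--         doc_id = context_to_id.get(context, None)
--         if doc_id is not None :
--             doc_ids.append(doc_id)
--         else :
--             doc_ids.append("Not Found")
--     return doc_ids
-- ===== SOURCE B (Python) =====
-- def get_docs_id(corpus, ground_context):
--     # Inverted strategy: index the QUERIES (context -> its positions in
--     # ground_context), pre-fill the answer with "Not Found", then make one pass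
--     # over corpus.items() writing each doc id into the matching positions;
--     # later corpus entries overwrite earlier ones (last wins).
--     positions = {}
--     for i, context in enumerate(ground_context):
--         positions.setdefault(context, []).append(i)
--
--     doc_ids = ["Not Found"] * len(ground_context)
--     for doc_id, context in corpus.items():
--         for i in positions.get(context, []):
--             doc_ids[i] = doc_id
--     return doc_ids
-- ===== Notes on version B (the rewrite author's own statement) =====
-- stated objective: alternative
-- what changed: Inverts A's strategy: instead of a reverse dict over the corpus with a lookup per query, B builds an index of query positions (context -> positions in ground_context), pre-fills the output with 'Not Found', and makes one pass over corpus.items() writing each doc id into the matching positions, so later corpus entries overwrite (the dict's last-wins behaviour).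
import Mathlib
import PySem

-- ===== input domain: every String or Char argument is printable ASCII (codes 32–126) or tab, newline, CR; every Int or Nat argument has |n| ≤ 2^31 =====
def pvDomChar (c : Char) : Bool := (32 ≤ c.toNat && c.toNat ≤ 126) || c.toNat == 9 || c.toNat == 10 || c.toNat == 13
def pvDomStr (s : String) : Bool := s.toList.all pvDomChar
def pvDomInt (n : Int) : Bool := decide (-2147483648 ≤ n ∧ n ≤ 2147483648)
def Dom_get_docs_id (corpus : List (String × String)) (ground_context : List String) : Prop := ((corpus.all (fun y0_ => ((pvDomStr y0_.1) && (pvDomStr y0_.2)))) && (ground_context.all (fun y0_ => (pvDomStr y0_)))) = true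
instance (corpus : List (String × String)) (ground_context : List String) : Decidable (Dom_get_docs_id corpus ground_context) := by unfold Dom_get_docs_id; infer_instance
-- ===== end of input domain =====

-- B inverts A's strategy: it indexes the query positions instead of the corpus and
-- writes ids into a pre-filled output in one corpus pass (objective: alternative).

-- ===== PORT A =====
-- context_to_id = {context: id for id, context in corpus.items()}  (dict build: last wins)
-- then for each context append the lookup or "Not Found"
def get_docs_id (corpus : List (String × String)) (ground_context : List String) : List String :=
  let context_to_id : PySem.Dict String String :=
    (PySem.Dict.ofList corpus).items.foldl (fun d p => d.insert p.2 p.1) PySem.Dict.empty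
  ground_context.foldl (fun doc_ids context =>
    match context_to_id.get? context with
    | some doc_id => doc_ids ++ [doc_id]
    | none => doc_ids ++ ["Not Found"]) []

-- ===== PORT B =====
-- positions: context -> list of its indices in ground_context
-- (setdefault(c, []).append(i) is Dict.modify c [] (· ++ [i]));
-- doc_ids = ["Not Found"] * len(ground_context); then one pass over corpus.items()
-- doing doc_ids[i] = doc_id — every i comes from enumerate, so it is a valid
-- nonnegative index and List.set is exact for the Python assignment here.
def get_docs_id_alt (corpus : List (String × String)) (ground_context : List String) : List String :=
  let positions : PySem.Dict String (List Int) :=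
    (PySem.List.enumerate ground_context 0).foldl
      (fun d q => d.modify q.2 [] (· ++ [q.1])) PySem.Dict.empty
  (PySem.Dict.ofList corpus).items.foldl
    (fun doc_ids p =>
      (positions.getD p.2 []).foldl (fun r i => r.set i.toNat p.1) doc_ids)
    (PySem.List.pyRepeat ["Not Found"] ground_context.length)

-- ===== PRECONDITION & SPEC =====
def Spec_get_docs_id (corpus : List (String × String)) (ground_context : List String) (out : List String) : Prop := out = get_docs_id_alt corpus ground_context
instance (corpus : List (String × String)) (ground_context : List String) (out : List String) : Decidable (Spec_get_docs_id corpus ground_context out) := by unfold Spec_get_docs_id; infer_instance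

-- ===== CLAIM =====
def Claim_equal_get_docs_id : Prop := ∀ (corpus : List (String × String)) (ground_context : List String), Dom_get_docs_id corpus ground_context → Spec_get_docs_id corpus ground_context (get_docs_id corpus ground_context)

-- ===== LEMMAS AND PROOFS =====

-- A-side: looking up c in the dict built by inserting (p.2, p.1) over l is a last-match scan of l.
theorem pv_build_get? (l : List (String × String)) (d : PySem.Dict String String) (c : String) :
    (l.foldl (fun d p => d.insert p.2 p.1) d).get? c
      = l.foldl (fun (acc : Option String) p => if p.2 == c then some p.1 else acc) (d.get? c) := by
  induction l generalizing d with
  | nil => rfl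
  | cons p t ih =>
    simp only [List.foldl_cons, ih]
    congr 1
    rw [PySem.Dict.get?_insert]
    by_cases h : p.2 = c
    · simp [h]
    · simp [h, Ne.symm h]

theorem pv_scan_getD (l : List (String × String)) (c : String) (o : Option String) :
    (l.foldl (fun (acc : Option String) p => if p.2 == c then some p.1 else acc) o).getD "Not Found"
      = l.foldl (fun found p => if p.2 == c then p.1 else found) (o.getD "Not Found") := by
  induction l generalizing o with
  | nil => rfl
  | cons p t ih =>
    simp only [List.foldl_cons]
    by_cases h : p.2 = c
    · rw [if_pos (by simp [h]), if_pos (by simp [h]), ih (some p.1)]; rfl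
    · rw [if_neg (by simp [h]), if_neg (by simp [h]), ih o]

-- A's appended element for context c is the last-match scan over the items list.
theorem pv_elem_eq (l : List (String × String)) (c : String) :
    (match (l.foldl (fun d p => d.insert p.2 p.1) PySem.Dict.empty).get? c with
      | some doc_id => doc_id
      | none => "Not Found")
      = l.foldl (fun found p => if p.2 == c then p.1 else found) "Not Found" := by
  rw [pv_build_get?]
  rw [show (PySem.Dict.empty : PySem.Dict String String).get? c = none from rfl]
  have h2 := pv_scan_getD l c none
  rw [show ((none : Option String).getD "Not Found") = "Not Found" from rfl] at h2
  rw [← h2]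
  cases l.foldl (fun (acc : Option String) p => if p.2 == c then some p.1 else acc) none <;> rfl

-- A's append-fold is a map.
theorem pv_foldl_map (gc : List String) (f : String → String) (acc : List String) :
    gc.foldl (fun doc_ids c => doc_ids ++ [f c]) acc = acc ++ gc.map f := by
  induction gc generalizing acc with
  | nil => simp
  | cons c t ih => simp [List.foldl_cons, ih]

theorem pv_fold_eq (gc : List String) (F G : List String → String → List String)
    (acc : List String) (h : ∀ a c, F a c = G a c) :
    gc.foldl F acc = gc.foldl G acc := by
  induction gc generalizing acc with
  | nil => rfl
  | cons c t ih => simp only [List.foldl_cons, h, ih]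

-- B-side: the grouping fold stores, under each key c, exactly the first components
-- of the pairs whose second component is c, in order.
theorem pv_positions_getD (l : List (Int × String)) (d : PySem.Dict String (List Int)) (c : String) :
    (l.foldl (fun d q => d.modify q.2 [] (· ++ [q.1])) d).getD c []
      = d.getD c [] ++ (l.filter (fun q => q.2 == c)).map (·.1) := by
  induction l generalizing d with
  | nil => simp
  | cons q t ih =>
    simp only [List.foldl_cons, List.filter_cons, ih]
    rw [PySem.Dict.getD_modify]
    by_cases h : q.2 = c
    · simp [h]
    · simp [h, Ne.symm h]

-- setting the same value at a list of indices: the element at k is id iff some index hits k (and k is in range).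
theorem pv_setfold_getElem? (js : List Int) (id : String) (r : List String) (k : Nat) :
    (js.foldl (fun r i => r.set i.toNat id) r)[k]?
      = if js.any (fun i => i.toNat == k) then (if k < r.length then some id else none)
        else r[k]? := by
  induction js generalizing r with
  | nil => simp
  | cons i t ih =>
    simp only [List.foldl_cons, ih, List.length_set, List.any_cons]
    by_cases hik : i.toNat = k
    · by_cases ht : t.any (fun i => i.toNat == k) <;> simp [hik, ht, List.getElem?_set]
    · by_cases ht : t.any (fun i => i.toNat == k) <;> simp [hik, ht, List.getElem?_set]

-- an index of the positions list for c hits k iff gc[k] = c.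
theorem pv_positions_any (gc : List String) (c : String) (k : Nat) :
    ((((PySem.List.enumerate gc 0).filter (fun q => q.2 == c)).map (·.1)).any
        (fun i => i.toNat == k)) = true
      ↔ ∃ h : k < gc.length, gc[k] = c := by
  simp only [List.any_eq_true, List.mem_map, List.mem_filter,
    PySem.List.mem_enumerate_iff, beq_iff_eq]
  constructor
  · rintro ⟨i, ⟨q, ⟨⟨j, hj, rfl⟩, hc⟩, rfl⟩, hk⟩
    simp only [zero_add] at hc hk ⊢
    have : j = k := by omega
    subst this
    exact ⟨hj, hc⟩
  · rintro ⟨hk, hc⟩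
    exact ⟨(k : Int), ⟨((k : Int), gc[k]), ⟨⟨k, hk, by simp⟩, hc⟩, rfl⟩, by simp⟩

-- applying one corpus item overlays its id onto the matching positions of gc.map f.
theorem pv_overlay (gc : List String) (f : String → String) (id ctx : String) :
    ((((PySem.List.enumerate gc 0).filter (fun q => q.2 == ctx)).map (·.1)).foldl
        (fun r i => r.set i.toNat id) (gc.map f))
      = gc.map (fun c => if c == ctx then id else f c) := by
  apply List.ext_getElem?
  intro k
  rw [pv_setfold_getElem?]
  by_cases hk : k < gc.length
  · by_cases hc : gc[k] = ctx
    · rw [if_pos (by rw [pv_positions_any]; exact ⟨hk, hc⟩)]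
      simp [hk, hc]
    · rw [if_neg (by rw [pv_positions_any]; rintro ⟨_, h⟩; exact hc h)]
      simp [List.getElem?_map, List.getElem?_eq_getElem hk, hc]
  · rw [show (gc.map f).length = gc.length from List.length_map ..] at *
    have h1 : (gc.map f)[k]? = none := by simp; omega
    have h2 : (gc.map (fun c => if c == ctx then id else f c))[k]? = none := by simp; omega
    rw [h1, h2]
    split <;> simp <;> omega

-- B's corpus fold, started at gc.map f, is gc.map of the last-match scan started at f.
theorem pv_alt_fold (l : List (String × String)) (gc : List String) (f : String → String) :
    l.foldl (fun doc_ids p =>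
        ((((PySem.List.enumerate gc 0).foldl
            (fun d q => d.modify q.2 [] (· ++ [q.1])) PySem.Dict.empty).getD p.2 []).foldl
          (fun r i => r.set i.toNat p.1) doc_ids)) (gc.map f)
      = gc.map (fun c => l.foldl (fun found p => if p.2 == c then p.1 else found) (f c)) := by
  induction l generalizing f with
  | nil => rfl
  | cons p t ih =>
    simp only [List.foldl_cons]
    rw [pv_positions_getD, show (PySem.Dict.empty : PySem.Dict String (List Int)).getD p.2 [] = [] from rfl,
      List.nil_append, pv_overlay gc f p.1 p.2, ih]
    congr 1
    funext c
    by_cases h : c = p.2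
    · simp [h]
    · simp [h, Ne.symm h]

-- ===== VERDICT =====
theorem get_docs_id_spec : Claim_equal_get_docs_id := by
  intro corpus ground_context _
  simp only [Spec_get_docs_id, get_docs_id, get_docs_id_alt]
  have hrep : PySem.List.pyRepeat ["Not Found"] ground_context.length
      = ground_context.map (fun _ => "Not Found") := by
    rw [PySem.List.pyRepeat_singleton]
    simp [List.map_const']
  rw [hrep, pv_alt_fold]
  rw [pv_fold_eq ground_context _
    (fun doc_ids c => doc_ids ++
      [(PySem.Dict.ofList corpus).items.foldl
        (fun found p => if p.2 == c then p.1 else found) "Not Found"]) []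
    (fun a c => by
      have hc := pv_elem_eq (PySem.Dict.ofList corpus).items c
      cases hg : (((PySem.Dict.ofList corpus).items.foldl
          (fun d p => d.insert p.2 p.1) PySem.Dict.empty).get? c) with
      | some doc_id => rw [hg] at hc; simp only [hc]
      | none => rw [hg] at hc; simp only [← hc])]
  rw [pv_foldl_map]
  simp
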